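-- pv_equiv track=rewrite | github.com/Annette308-bot/rppg_server_pack | server.py | _pick_spo2_column
-- ===== SOURCE A (Python) =====
-- from typing import Optional, Dict, Any, List
--
-- def _pick_spo2_column(fieldnames: List[str]) -> Optional[str]:
--     if not fieldnames:
--         return None
--     lowered = [c.lower() for c in fieldnames]
--     candidates = [
--         "spo2_pct", "spo2_percent", "spo2", "spo2_value", "spo2_est",
--         "spo2_trend", "spo2_index"
--     ]
--     for cand in candidates:
--         for i, col in enumerate(lowered):
--             if col == cand:
--                 return fieldnames[i]
--     for i, col in enumerate(lowered):
--         if "spo2" in col: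
--             return fieldnames[i]
--     return None
-- ===== SOURCE B (Python) =====
-- _CANDIDATES = ["spo2_pct", "spo2_percent", "spo2", "spo2_value", "spo2_est",
--                "spo2_trend", "spo2_index"]
--
-- def _rank(low):
--     """Priority rank of a lowered column name: its index in the candidate
--     list, len(candidates) for a non-candidate containing 'spo2', None otherwise."""
--     try:
--         return _CANDIDATES.index(low)
--     except ValueError:
--         return len(_CANDIDATES) if "spo2" in low else None
--
-- def _pick_spo2_column(fieldnames):
--     # Single pass: keep the earliest column achieving the minimal rank
--     # (strict '<' preserves the first occurrence among equal ranks).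
--     best = None  # (rank, original column) or None
--     for col in fieldnames:
--         r = _rank(col.lower())
--         if r is not None and (best is None or r < best[0]):
--             best = (r, col)
--     return best[1] if best is not None else None
-- ===== Notes on version B (the rewrite author's own statement) =====
-- stated objective: alternative
-- what changed: Instead of A's candidate-by-candidate exact-match scans followed by a substring pass, B assigns each column a numeric priority rank once (index in the candidate list, 7 for a substring-only match, None otherwise) and returns the argmin by rank in a single pass, with strict '<' keeping the earliest column on rank ties.
import Mathlib
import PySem

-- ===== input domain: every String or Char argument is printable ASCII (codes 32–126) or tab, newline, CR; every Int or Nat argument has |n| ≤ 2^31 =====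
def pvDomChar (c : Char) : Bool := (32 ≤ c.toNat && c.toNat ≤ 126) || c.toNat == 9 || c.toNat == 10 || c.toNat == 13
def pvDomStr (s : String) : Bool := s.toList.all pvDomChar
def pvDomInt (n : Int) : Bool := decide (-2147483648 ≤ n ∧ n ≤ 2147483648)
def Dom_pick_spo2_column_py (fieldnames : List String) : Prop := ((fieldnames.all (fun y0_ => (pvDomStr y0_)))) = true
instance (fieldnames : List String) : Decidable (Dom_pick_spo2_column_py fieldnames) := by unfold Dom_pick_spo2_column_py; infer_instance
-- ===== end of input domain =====

-- B replaces A's candidate-by-candidate exact scans + substring pass by a single pass that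
-- scores every column with a priority rank and keeps the argmin (earliest wins on ties);
-- return value only, no side effects.

-- ===== PORT A =====
-- inner loop 'for i, col in enumerate(lowered): if col == cand: return fieldnames[i]'
def pickA_exactLoop (fieldnames : List String) (cand : String) : List (Int × String) → Option String
  | [] => none
  | (i, col) :: rest =>
      if col == cand then some (PySem.List.pyGetD fieldnames i "")
      else pickA_exactLoop fieldnames cand rest

-- outer loop 'for cand in candidates: …'
def pickA_candLoop (fieldnames lowered : List String) : List String → Option String
  | [] => none
  | cand :: cs =>
      match pickA_exactLoop fieldnames cand (PySem.List.enumerate lowered) with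
      | some r => some r
      | none => pickA_candLoop fieldnames lowered cs

-- fallback loop 'for i, col in enumerate(lowered): if "spo2" in col: return fieldnames[i]'
def pickA_subLoop (fieldnames : List String) : List (Int × String) → Option String
  | [] => none
  | (i, col) :: rest =>
      if PySem.Str.isIn "spo2" col then some (PySem.List.pyGetD fieldnames i "")
      else pickA_subLoop fieldnames rest

def pick_spo2_column_py (fieldnames : List String) : Option String :=
  if fieldnames = [] then none
  else
    let lowered := fieldnames.map PySem.Str.lower
    match pickA_candLoop fieldnames lowered
        ["spo2_pct", "spo2_percent", "spo2", "spo2_value", "spo2_est",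
         "spo2_trend", "spo2_index"] with
    | some r => some r
    | none => pickA_subLoop fieldnames (PySem.List.enumerate lowered)

-- ===== PORT B =====
def pickCands : List String :=
  ["spo2_pct", "spo2_percent", "spo2", "spo2_value", "spo2_est",
   "spo2_trend", "spo2_index"]

-- '_rank(low)': candidates.index(low), else len(candidates) if "spo2" in low else None
def pickRank (low : String) : Option Int :=
  match PySem.List.index? pickCands low with
  | some i => some (i : Int)
  | none => if PySem.Str.isIn "spo2" low then some ((pickCands.length : Int)) else none

-- loop body: 'if r is not None and (best is None or r < best[0]): best = (r, col)'
def pickB_step (best : Option (Int × String)) (col : String) : Option (Int × String) :=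
  match pickRank (PySem.Str.lower col) with
  | none => best
  | some r =>
      match best with
      | none => some (r, col)
      | some (rb, cb) => if r < rb then some (r, col) else some (rb, cb)

def pick_spo2_column_py_alt (fieldnames : List String) : Option String :=
  (fieldnames.foldl pickB_step none).map (·.2)

-- ===== PRECONDITION & SPEC =====
def Spec_pick_spo2_column_py (fieldnames : List String) (out : Option String) : Prop := out = pick_spo2_column_py_alt fieldnames
instance (fieldnames : List String) (out : Option String) : Decidable (Spec_pick_spo2_column_py fieldnames out) := by unfold Spec_pick_spo2_column_py; infer_instance

-- ===== CLAIM (what is proved, stated in full; the proofs are below) =====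
def Claim_equal_pick_spo2_column_py : Prop := ∀ (fieldnames : List String), Dom_pick_spo2_column_py fieldnames → Spec_pick_spo2_column_py fieldnames (pick_spo2_column_py fieldnames)

-- ===== LEMMAS AND PROOFS =====

-- A's inner exact-match scan is find? on the suffix it enumerates
theorem pickA_exactLoop_eq (cand : String) :
    ∀ (rest : List String) (s : Nat) (full : List String), full.drop s = rest →
      pickA_exactLoop full cand (PySem.List.enumerate (rest.map PySem.Str.lower) (s : Int)) =
        rest.find? (fun c => PySem.Str.lower c == cand) := by
  intro rest
  induction rest with
  | nil => intro s full h; simp [pickA_exactLoop, PySem.List.enumerate_nil]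
  | cons c rest' ih =>
      intro s full h
      have hget : full[s]? = some c := by
        have h0 : (List.drop s full)[0]? = some c := by simp [h]
        rw [List.getElem?_drop] at h0; simpa using h0
      have hdrop' : full.drop (s + 1) = rest' := by
        have h1 : (full.drop s).drop 1 = rest' := by simp [h]
        simpa [List.drop_drop] using h1
      rw [List.map_cons, PySem.List.enumerate_cons]
      show (if (PySem.Str.lower c == cand) = true
              then some (PySem.List.pyGetD full (s : Int) "")
              else pickA_exactLoop full cand
                (PySem.List.enumerate (rest'.map PySem.Str.lower) ((s : Int) + 1))) = _
      by_cases hc : (PySem.Str.lower c == cand) = true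
      · rw [if_pos hc, List.find?_cons_of_pos (p := fun x => PySem.Str.lower x == cand) hc]
        have hv : PySem.List.pyGetD full (s : Int) "" = c := by
          rw [PySem.List.pyGetD_natCast]; simp [List.getD, hget]
        rw [hv]
      · rw [if_neg hc, List.find?_cons_of_neg (p := fun x => PySem.Str.lower x == cand) (by simpa using hc)]
        have hcast : ((s : Int) + 1) = ((s + 1 : Nat) : Int) := by push_cast; ring
        rw [hcast, ih (s + 1) full hdrop']

-- A's fallback scan is find? on the suffix it enumerates
theorem pickA_subLoop_eq :
    ∀ (rest : List String) (s : Nat) (full : List String), full.drop s = rest →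
      pickA_subLoop full (PySem.List.enumerate (rest.map PySem.Str.lower) (s : Int)) =
        rest.find? (fun c => PySem.Str.isIn "spo2" (PySem.Str.lower c)) := by
  intro rest
  induction rest with
  | nil => intro s full h; simp [pickA_subLoop, PySem.List.enumerate_nil]
  | cons c rest' ih =>
      intro s full h
      have hget : full[s]? = some c := by
        have h0 : (List.drop s full)[0]? = some c := by simp [h]
        rw [List.getElem?_drop] at h0; simpa using h0
      have hdrop' : full.drop (s + 1) = rest' := by
        have h1 : (full.drop s).drop 1 = rest' := by simp [h]
        simpa [List.drop_drop] using h1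
      rw [List.map_cons, PySem.List.enumerate_cons]
      show (if (PySem.Str.isIn "spo2" (PySem.Str.lower c)) = true
              then some (PySem.List.pyGetD full (s : Int) "")
              else pickA_subLoop full
                (PySem.List.enumerate (rest'.map PySem.Str.lower) ((s : Int) + 1))) = _
      by_cases hc : (PySem.Str.isIn "spo2" (PySem.Str.lower c)) = true
      · rw [if_pos hc, List.find?_cons_of_pos (p := fun x => PySem.Str.isIn "spo2" (PySem.Str.lower x)) hc]
        have hv : PySem.List.pyGetD full (s : Int) "" = c := by
          rw [PySem.List.pyGetD_natCast]; simp [List.getD, hget]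
        rw [hv]
      · rw [if_neg hc, List.find?_cons_of_neg (p := fun x => PySem.Str.isIn "spo2" (PySem.Str.lower x)) (by simpa using hc)]
        have hcast : ((s : Int) + 1) = ((s + 1 : Nat) : Int) := by push_cast; ring
        rw [hcast, ih (s + 1) full hdrop']

theorem pickA_exactLoop_eq0 (full : List String) (cand : String) :
    pickA_exactLoop full cand (PySem.List.enumerate (full.map PySem.Str.lower)) =
      full.find? (fun c => PySem.Str.lower c == cand) := by
  have h := pickA_exactLoop_eq cand full 0 full (by simp)
  simpa using h

theorem pickA_subLoop_eq0 (full : List String) :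
    pickA_subLoop full (PySem.List.enumerate (full.map PySem.Str.lower)) =
      full.find? (fun c => PySem.Str.isIn "spo2" (PySem.Str.lower c)) := by
  have h := pickA_subLoop_eq full 0 full (by simp)
  simpa using h

-- ---------- B-side analysis ----------

-- left-biased "min by rank" merge
def pickMerge : Option (Int × String) → Option (Int × String) → Option (Int × String)
  | b, none => b
  | none, some y => some y
  | some (rb, cb), some (r, c) => if r < rb then some (r, c) else some (rb, cb)

def pickRankOpt (c : String) : Option (Int × String) :=
  (pickRank (PySem.Str.lower c)).map (fun r => (r, c))

theorem pickB_step_eq (b : Option (Int × String)) (c : String) :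
    pickB_step b c = pickMerge b (pickRankOpt c) := by
  unfold pickB_step pickRankOpt pickMerge
  cases pickRank (PySem.Str.lower c) <;> cases b <;> simp

theorem pickMerge_none_left (y : Option (Int × String)) : pickMerge none y = y := by
  cases y <;> rfl

theorem pickMerge_assoc (a x y : Option (Int × String)) :
    pickMerge (pickMerge a x) y = pickMerge a (pickMerge x y) := by
  rcases a with _ | ⟨ra, ca⟩ <;> rcases x with _ | ⟨rx, cx⟩ <;> rcases y with _ | ⟨ry, cy⟩
  · rfl
  · rfl
  · rfl
  · rw [pickMerge_none_left, pickMerge_none_left]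
  · rfl
  · rfl
  · rfl
  · simp only [pickMerge]
    split_ifs <;> first | rfl | omega | (simp only []; split_ifs <;> first | rfl | omega)

theorem pickB_fold_merge (xs : List String) :
    ∀ (b : Option (Int × String)),
      xs.foldl pickB_step b = pickMerge b (xs.foldl pickB_step none) := by
  induction xs with
  | nil => intro b; cases b <;> rfl
  | cons c cs ih =>
      intro b
      rw [List.foldl_cons, List.foldl_cons, ih (pickB_step b c), ih (pickB_step none c),
        pickB_step_eq b c, pickB_step_eq none c, pickMerge_none_left, pickMerge_assoc]

theorem pickB_fold_cons (c : String) (cs : List String) :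
    (c :: cs).foldl pickB_step none =
      pickMerge (pickRankOpt c) (cs.foldl pickB_step none) := by
  rw [List.foldl_cons, pickB_fold_merge cs (pickB_step none c), pickB_step_eq none c,
    pickMerge_none_left]

-- rank predicate
def pickPr (k : Int) (d : String) : Bool := pickRank (PySem.Str.lower d) == some k

-- closed form of the rank function
set_option maxHeartbeats 1600000 in
theorem pickRank_cases (s : String) :
    pickRank s =
      (if s = "spo2_pct" then some 0 else if s = "spo2_percent" then some 1 else
       if s = "spo2" then some 2 else if s = "spo2_value" then some 3 else
       if s = "spo2_est" then some 4 else if s = "spo2_trend" then some 5 else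
       if s = "spo2_index" then some 6 else
       if PySem.Str.isIn "spo2" s then some 7 else none) := by
  by_cases h0 : s = "spo2_pct"
  · subst h0; decide
  by_cases h1 : s = "spo2_percent"
  · subst h1; decide
  by_cases h2 : s = "spo2"
  · subst h2; decide
  by_cases h3 : s = "spo2_value"
  · subst h3; decide
  by_cases h4 : s = "spo2_est"
  · subst h4; decide
  by_cases h5 : s = "spo2_trend"
  · subst h5; decide
  by_cases h6 : s = "spo2_index"
  · subst h6; decide
  have hni : PySem.List.index? pickCands s = none := by
    rw [PySem.List.index?_eq_none_iff]
    simp [pickCands]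
    exact ⟨h0, h1, h2, h3, h4, h5, h6⟩
  simp only [pickRank, hni, if_neg h0, if_neg h1, if_neg h2, if_neg h3, if_neg h4, if_neg h5,
    if_neg h6]
  rfl

-- characterization of the fold: none ⇒ no column has a rank
theorem pickB_fold_none (xs : List String) :
    xs.foldl pickB_step none = none →
      ∀ c ∈ xs, pickRank (PySem.Str.lower c) = none := by
  induction xs with
  | nil => intro _ c hc; cases hc
  | cons x cs ih =>
      intro h c hc
      rw [pickB_fold_cons] at h
      have hx : pickRankOpt x = none ∧ cs.foldl pickB_step none = none := by
        rcases hh : pickRankOpt x with _ | ⟨rx0, cx0⟩ <;>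
          rcases hf : cs.foldl pickB_step none with _ | ⟨rz, cz⟩ <;>
            rw [hh, hf] at h
        · exact ⟨rfl, rfl⟩
        · exact absurd h (by simp [pickMerge])
        · exact absurd h (by simp [pickMerge])
        · simp only [pickMerge] at h
          split_ifs at h
      rcases List.mem_cons.mp hc with hc | hc
      · subst hc
        rcases hr : pickRank (PySem.Str.lower c) with _ | r
        · rfl
        · exfalso; have := hx.1; rw [pickRankOpt, hr] at this; simp at this
      · exact ih hx.2 c hc

-- characterization of the fold: some (r, c) ⇒ c is the first column of rank r and no rank below r occurs
theorem pickB_fold_some (xs : List String) :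
    ∀ (r : Int) (c : String), xs.foldl pickB_step none = some (r, c) →
      xs.find? (pickPr r) = some c ∧ ∀ k : Int, k < r → xs.find? (pickPr k) = none := by
  induction xs with
  | nil => intro r c h; simp at h
  | cons x cs ih =>
      intro r c h
      rw [pickB_fold_cons] at h
      rcases hx : pickRank (PySem.Str.lower x) with _ | rx
      · -- x has no rank: it never matches any pickPr k
        have hxp : ∀ k : Int, pickPr k x = false := by
          intro k; simp [pickPr, hx]
        rw [pickRankOpt, hx] at h
        simp only [Option.map_none, pickMerge_none_left] at h
        obtain ⟨h1, h2⟩ := ih r c h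
        constructor
        · rw [List.find?_cons_of_neg (by simp [hxp r]), h1]
        · intro k hk
          rw [List.find?_cons_of_neg (by simp [hxp k]), h2 k hk]
      · rw [pickRankOpt, hx] at h
        simp only [Option.map_some] at h
        rcases hf : cs.foldl pickB_step none with _ | ⟨r', c'⟩
        · -- no ranked column in cs
          rw [hf] at h
          have hrc : rx = r ∧ x = c := by
            simpa [pickMerge] using h
          obtain ⟨hr, hc⟩ := hrc; subst hr; subst hc
          have hnone : ∀ k : Int, cs.find? (pickPr k) = none := by
            intro k
            rw [List.find?_eq_none]
            intro d hd
            simp [pickPr, pickB_fold_none cs hf d hd]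
          refine ⟨?_, ?_⟩
          · rw [List.find?_cons_of_pos (by simp [pickPr, hx])]
          · intro k hk
            have hkx : pickPr k x = false := by
              simp only [pickPr, hx]; simp; omega
            rw [List.find?_cons_of_neg (by simp [hkx]), hnone k]
        · rw [hf] at h
          obtain ⟨h1, h2⟩ := ih r' c' hf
          by_cases hlt : r' < rx
          · -- the tail's minimum wins
            have hrc : r = r' ∧ c = c' := by
              simp only [pickMerge, if_pos hlt, Option.some.injEq, Prod.mk.injEq] at h
              exact ⟨h.1.symm, h.2.symm⟩
            rw [hrc.1, hrc.2]
            have hxr : pickPr r' x = false := by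
              simp only [pickPr, hx]; simp; omega
            refine ⟨?_, ?_⟩
            · rw [List.find?_cons_of_neg (by simp [hxr]), h1]
            · intro k hk
              have hkx : pickPr k x = false := by
                simp only [pickPr, hx]; simp; omega
              rw [List.find?_cons_of_neg (by simp [hkx]), h2 k hk]
          · -- x wins (ties kept left)
            have hrc : r = rx ∧ c = x := by
              simp only [pickMerge, if_neg hlt, Option.some.injEq, Prod.mk.injEq] at h
              exact ⟨h.1.symm, h.2.symm⟩
            rw [hrc.1, hrc.2]
            refine ⟨?_, ?_⟩
            · rw [List.find?_cons_of_pos (by simp [pickPr, hx])]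
            · intro k hk
              have hkx : pickPr k x = false := by
                simp only [pickPr, hx]; simp; omega
              rw [List.find?_cons_of_neg (by simp [hkx]), h2 k (by omega)]

-- the exact-match predicate at candidate slot i IS the rank-i predicate (as functions)
set_option maxHeartbeats 1600000 in
theorem pickPred_eq (i : Nat) (hi : i < 7) (ci : String) (hci : pickCands[i]? = some ci) :
    (fun d => PySem.Str.lower d == ci) = pickPr (i : Int) := by
  funext d
  have h := pickRank_cases (PySem.Str.lower d)
  simp only [pickPr]
  interval_cases i <;> simp only [pickCands] at hci <;>
    (injection hci with hci; subst hci) <;>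
    (rw [h]; split_ifs with h0 h1 h2 h3 h4 h5 h6 h7 <;> simp_all)

-- membership version of find?-congruence
theorem find?_congr_mem {α : Type} (l : List α) (p q : α → Bool)
    (h : ∀ x ∈ l, p x = q x) : l.find? p = l.find? q := by
  induction l with
  | nil => rfl
  | cons x xs ih =>
      by_cases hp : p x = true
      · rw [List.find?_cons_of_pos hp, List.find?_cons_of_pos ((h x (by simp)) ▸ hp)]
      · rw [List.find?_cons_of_neg hp,
          List.find?_cons_of_neg (by rw [← h x (by simp)]; exact hp),
          ih (fun x hx => h x (by simp [hx]))]

-- any rank produced is between 0 and 7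
theorem pickRank_bound (s : String) (r : Int) (h : pickRank s = some r) : 0 ≤ r ∧ r ≤ 7 := by
  rw [pickRank_cases] at h
  split_ifs at h <;> (injection h with h; omega)

-- ===== VERDICT (by name: the statement is the Claim_ definition above) =====
set_option maxHeartbeats 1600000 in
theorem pick_spo2_column_py_spec : Claim_equal_pick_spo2_column_py := by
  intro fieldnames _
  unfold Spec_pick_spo2_column_py
  by_cases hnil : fieldnames = []
  · subst hnil; decide
  · simp only [pick_spo2_column_py, pick_spo2_column_py_alt, if_neg hnil]
    -- A's candidate scans as find?s over the original list
    simp only [pickA_candLoop, pickA_exactLoop_eq0, pickA_subLoop_eq0]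
    rw [pickPred_eq 0 (by omega) _ rfl, pickPred_eq 1 (by omega) _ rfl,
      pickPred_eq 2 (by omega) _ rfl, pickPred_eq 3 (by omega) _ rfl,
      pickPred_eq 4 (by omega) _ rfl, pickPred_eq 5 (by omega) _ rfl,
      pickPred_eq 6 (by omega) _ rfl]
    push_cast
    rcases hB : fieldnames.foldl pickB_step none with _ | ⟨r, c⟩
    · -- B found nothing: no column has any rank, so every scan of A fails too
      have hno := pickB_fold_none fieldnames hB
      have hfk : ∀ k : Int, fieldnames.find? (pickPr k) = none := by
        intro k; rw [List.find?_eq_none]; intro d hd; simp [pickPr, hno d hd]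
      have hsub : fieldnames.find? (fun d => PySem.Str.isIn "spo2" (PySem.Str.lower d)) = none := by
        rw [List.find?_eq_none]
        intro d hd
        have h := pickRank_cases (PySem.Str.lower d)
        rw [hno d hd] at h
        split_ifs at h; simp_all
      rw [hfk 0, hfk 1, hfk 2, hfk 3, hfk 4, hfk 5, hfk 6, hsub]
      rfl
    · -- B found the first column c of the minimal rank r
      obtain ⟨h1, h2⟩ := pickB_fold_some fieldnames r c hB
      have hpd : pickPr r c = true := List.find?_some h1
      have hrb : 0 ≤ r ∧ r ≤ 7 := by
        have hr : pickRank (PySem.Str.lower c) = some r := by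
          simpa [pickPr] using hpd
        exact pickRank_bound _ r hr
      obtain ⟨hr0, hr7⟩ := hrb
      simp only [Option.map_some]
      interval_cases r
      · rw [h1]
      · rw [h2 0 (by omega), h1]
      · rw [h2 0 (by omega), h2 1 (by omega), h1]
      · rw [h2 0 (by omega), h2 1 (by omega), h2 2 (by omega), h1]
      · rw [h2 0 (by omega), h2 1 (by omega), h2 2 (by omega), h2 3 (by omega), h1]
      · rw [h2 0 (by omega), h2 1 (by omega), h2 2 (by omega), h2 3 (by omega),
          h2 4 (by omega), h1]
      · rw [h2 0 (by omega), h2 1 (by omega), h2 2 (by omega), h2 3 (by omega),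
          h2 4 (by omega), h2 5 (by omega), h1]
      · -- r = 7: A falls through all exact scans to the substring pass
        have hsub : fieldnames.find? (fun d => PySem.Str.isIn "spo2" (PySem.Str.lower d)) =
            fieldnames.find? (pickPr 7) := by
          apply find?_congr_mem
          intro x hx
          have hcases := pickRank_cases (PySem.Str.lower x)
          have hnk : ∀ k : Int, k < 7 → pickPr k x = false := by
            intro k hk
            have hn := h2 k hk
            rw [List.find?_eq_none] at hn
            simpa using hn x hx
          have n0 := hnk 0 (by omega); have n1 := hnk 1 (by omega)
          have n2 := hnk 2 (by omega); have n3 := hnk 3 (by omega)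
          have n4 := hnk 4 (by omega); have n5 := hnk 5 (by omega)
          have n6 := hnk 6 (by omega)
          simp only [pickPr] at n0 n1 n2 n3 n4 n5 n6 ⊢
          split_ifs at hcases <;> simp_all
        rw [h2 0 (by omega), h2 1 (by omega), h2 2 (by omega), h2 3 (by omega),
          h2 4 (by omega), h2 5 (by omega), h2 6 (by omega), hsub, h1]
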